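-- pv_equiv track=rewrite | github.com/daniel-reich/ubiquitous-fiesta | bJxNHk7aovkx8Q776_9.py | gold_distribution
-- ===== SOURCE A (Python) =====
-- def gold_distribution(gold):
--   def choose(lst):
--     if lst[-1] > lst[0]:
--       return [lst[-1], lst[:-1]]
--     else:
--       return [lst[0], lst[1:]]
--
--   muba = []
--   matt = []
--   mu = True
--
--   while len(gold) > 0:
--     c = choose(gold)
--     if mu == True:
--       muba.append(c[0])
--       mu = False
--     else:
--       matt.append(c[0])
--       mu = True
--     gold = c[1]
--
--   return [sum(muba), sum(matt)]
-- ===== SOURCE B (Python) =====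
-- def gold_distribution(gold):
--   i, j = 0, len(gold) - 1
--   s = [0, 0]
--   t = 0
--   while i <= j:
--     if gold[j] > gold[i]:
--       v = gold[j]
--       j -= 1
--     else:
--       v = gold[i]
--       i += 1
--     s[t] += v
--     t = 1 - t
--   return s
-- ===== Notes on version B (the rewrite author's own statement) =====
-- stated objective: faster
-- what changed: Replaces the list-slicing loop (each step copies the remaining list and finally sums two grown lists) by a two-pointer single pass over the untouched list with two running sums and an alternating turn index.
import Mathlib
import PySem

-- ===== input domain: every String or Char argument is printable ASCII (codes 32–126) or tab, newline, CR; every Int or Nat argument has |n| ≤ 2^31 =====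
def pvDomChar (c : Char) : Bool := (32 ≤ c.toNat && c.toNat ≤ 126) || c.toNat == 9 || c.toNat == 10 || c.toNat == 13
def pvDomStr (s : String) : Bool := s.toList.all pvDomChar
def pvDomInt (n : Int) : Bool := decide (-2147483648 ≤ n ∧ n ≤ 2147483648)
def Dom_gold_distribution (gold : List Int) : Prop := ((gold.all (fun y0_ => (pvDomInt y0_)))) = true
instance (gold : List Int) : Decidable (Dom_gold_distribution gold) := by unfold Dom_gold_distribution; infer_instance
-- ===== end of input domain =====

-- B replaces A's slice-and-recurse loop by a two-pointer single pass with two running sums.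

-- ===== PORT A =====
-- A's `while len(gold) > 0` loop; `choose` is inlined at its single call site.
-- On the nonempty list x :: xs: lst[-1] = getLast, lst[0] = x, lst[:-1] = dropLast,
-- lst[1:] = xs — exact for nonempty lists, the only way A calls `choose`.
-- The Nat fuel only makes the recursion structural: each step removes one element,
-- so fuel = gold.length never runs out.
def goldLoopA : Nat → List Int → List Int → List Int → Bool → (List Int × List Int)
  | 0, _, muba, matt, _ => (muba, matt)
  | _ + 1, [], muba, matt, _ => (muba, matt)
  | fuel + 1, x :: xs, muba, matt, mu =>
      let c : Int × List Int :=
        if (x :: xs).getLast (by simp) > x then ((x :: xs).getLast (by simp), (x :: xs).dropLast)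
        else (x, xs)
      if mu then goldLoopA fuel c.2 (muba ++ [c.1]) matt false
      else goldLoopA fuel c.2 muba (matt ++ [c.1]) true

def gold_distribution (gold : List Int) : List Int :=
  let p := goldLoopA gold.length gold [] [] true
  [p.1.sum, p.2.sum]

-- ===== PORT B =====
-- B's `while i <= j` loop; i, j are Python ints (j reaches -1 on empty input), so Int here.
-- `s[t] += v; t = 1 - t` is written per branch: t = true means it is s0's turn.
-- The Nat fuel only makes the recursion structural (j - i shrinks each step, so
-- fuel = gold.length never runs out), and getD's default 0 is never read:
-- 0 ≤ i ≤ j < gold.length is a loop invariant of the Python whenever it indexes.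
def goldLoopB (gold : List Int) : Nat → Int → Int → Int → Int → Bool → Int × Int
  | 0, _, _, s0, s1, _ => (s0, s1)
  | fuel + 1, i, j, s0, s1, t =>
      if i ≤ j then
        if gold.getD j.toNat 0 > gold.getD i.toNat 0 then
          if t then goldLoopB gold fuel i (j - 1) (s0 + gold.getD j.toNat 0) s1 false
          else goldLoopB gold fuel i (j - 1) s0 (s1 + gold.getD j.toNat 0) true
        else
          if t then goldLoopB gold fuel (i + 1) j (s0 + gold.getD i.toNat 0) s1 false
          else goldLoopB gold fuel (i + 1) j s0 (s1 + gold.getD i.toNat 0) true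
      else (s0, s1)

def gold_distribution_alt (gold : List Int) : List Int :=
  let p := goldLoopB gold gold.length 0 ((gold.length : Int) - 1) 0 0 true
  [p.1, p.2]

-- ===== PRECONDITION & SPEC =====
def Spec_gold_distribution (gold : List Int) (out : List Int) : Prop := out = gold_distribution_alt gold
instance (gold : List Int) (out : List Int) : Decidable (Spec_gold_distribution gold out) := by unfold Spec_gold_distribution; infer_instance

-- ===== CLAIM (what is proved, stated in full; the proofs are below) =====
def Claim_equal_gold_distribution : Prop := ∀ (gold : List Int), Dom_gold_distribution gold → Spec_gold_distribution gold (gold_distribution gold)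

-- ===== LEMMAS AND PROOFS =====

-- Reference function: (what the player to move collects, what the other collects).
def pvF : List Int → Int × Int
  | [] => (0, 0)
  | x :: xs =>
      let c : Int × List Int :=
        if (x :: xs).getLast (by simp) > x then ((x :: xs).getLast (by simp), (x :: xs).dropLast)
        else (x, xs)
      let p := pvF c.2
      (c.1 + p.2, p.1)
  termination_by l => l.length
  decreasing_by
    all_goals (try split)
    all_goals (try simp)

lemma pvF_step (l : List Int) (h : l ≠ []) :
    pvF l = if l.getLast h > l.head h
            then (l.getLast h + (pvF l.dropLast).2, (pvF l.dropLast).1)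
            else (l.head h + (pvF l.tail).2, (pvF l.tail).1) := by
  match l with
  | x :: xs =>
    rw [pvF]
    simp only [List.head_cons, List.tail_cons]
    split <;> simp_all

lemma loopA_sum : ∀ (n : ℕ) (l muba matt : List Int) (mu : Bool), l.length ≤ n →
    ((goldLoopA n l muba matt mu).1.sum, (goldLoopA n l muba matt mu).2.sum)
      = if mu then (muba.sum + (pvF l).1, matt.sum + (pvF l).2)
        else (muba.sum + (pvF l).2, matt.sum + (pvF l).1) := by
  intro n
  induction n with
  | zero =>
    intro l muba matt mu h
    have hl : l = [] := List.eq_nil_of_length_eq_zero (by omega)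
    subst hl
    cases mu <;> simp [goldLoopA, pvF]
  | succ n ih =>
    intro l muba matt mu h
    match l with
    | [] => cases mu <;> simp [goldLoopA, pvF]
    | x :: xs =>
      rw [goldLoopA, pvF]
      simp only
      set c : Int × List Int :=
        if (x :: xs).getLast (by simp) > x then ((x :: xs).getLast (by simp), (x :: xs).dropLast)
        else (x, xs) with hc
      have hlen : c.2.length ≤ n := by
        rw [hc]; split <;> simp_all
      cases mu <;>
        simp only [Bool.false_eq_true, if_false, if_true] <;>
        rw [ih c.2 _ _ _ hlen] <;>
        cases (pvF c.2) <;> simp <;> ring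

lemma loopB_eq (gold : List Int) : ∀ (n : ℕ) (i j s0 s1 : Int) (t : Bool),
    (j + 1 - i).toNat ≤ n → 0 ≤ i → j < (gold.length : Int) →
    goldLoopB gold n i j s0 s1 t =
      (if t then (s0 + (pvF ((gold.drop i.toNat).take (j + 1 - i).toNat)).1,
                  s1 + (pvF ((gold.drop i.toNat).take (j + 1 - i).toNat)).2)
       else (s0 + (pvF ((gold.drop i.toNat).take (j + 1 - i).toNat)).2,
             s1 + (pvF ((gold.drop i.toNat).take (j + 1 - i).toNat)).1)) := by
  intro n
  induction n with
  | zero =>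
    intro i j s0 s1 t hn h0 hj
    have h0' : (j + 1 - i).toNat = 0 := by omega
    rw [h0', goldLoopB]
    cases t <;> simp [pvF]
  | succ n ih =>
    intro i j s0 s1 t hn h0 hj
    by_cases hij : i ≤ j
    · have hi : i.toNat < gold.length := by omega
      have hjn : j.toNat < gold.length := by omega
      have hgdi : gold.getD i.toNat 0 = gold[i.toNat]'hi := List.getD_eq_getElem gold 0 hi
      have hgdj : gold.getD j.toNat 0 = gold[j.toNat]'hjn := List.getD_eq_getElem gold 0 hjn
      have hseg : (gold.drop i.toNat).take (j + 1 - i).toNat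
          = gold[i.toNat] :: ((gold.drop (i.toNat + 1)).take (j - i).toNat) := by
        rw [List.drop_eq_getElem_cons hi]
        have h1 : (j + 1 - i).toNat = (j - i).toNat + 1 := by omega
        rw [h1, List.take_succ_cons]
      have hne : (gold.drop i.toNat).take (j + 1 - i).toNat ≠ [] := by
        rw [hseg]; simp
      have hlen : ((gold.drop i.toNat).take (j + 1 - i).toNat).length = (j + 1 - i).toNat := by
        simp; omega
      have hhead : ((gold.drop i.toNat).take (j + 1 - i).toNat).head hne = gold[i.toNat] := by
        rw [List.head_eq_getElem]
        simp only [List.getElem_take, List.getElem_drop]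
        simp
      have hlast : ((gold.drop i.toNat).take (j + 1 - i).toNat).getLast hne = gold[j.toNat]'hjn := by
        rw [List.getLast_eq_getElem]
        simp only [List.getElem_take, List.getElem_drop, hlen]
        congr 1; omega
      have hdl : ((gold.drop i.toNat).take (j + 1 - i).toNat).dropLast
          = (gold.drop i.toNat).take (j - 1 + 1 - i).toNat := by
        rw [List.dropLast_eq_take, hlen, List.take_take]
        congr 1; omega
      have htl : ((gold.drop i.toNat).take (j + 1 - i).toNat).tail
          = (gold.drop (i + 1).toNat).take (j + 1 - (i + 1)).toNat := by
        rw [hseg, List.tail_cons]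
        have h1 : (i + 1).toNat = i.toNat + 1 := by omega
        have h2 : (j + 1 - (i + 1)).toNat = (j - i).toNat := by omega
        rw [h1, h2]
      rw [goldLoopB, if_pos hij, hgdi, hgdj, pvF_step _ hne, hhead, hlast, hdl, htl]
      by_cases hgt : gold[j.toNat]'hjn > gold[i.toNat]'hi
      · rw [if_pos hgt, if_pos hgt]
        have hm : (j - 1 + 1 - i).toNat ≤ n := by omega
        cases t
        · simp only [Bool.false_eq_true, if_false]
          rw [ih i (j - 1) s0 (s1 + gold[j.toNat]'hjn) true hm h0 (by omega)]
          simp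
          try constructor
          all_goals ring
        · simp only [if_true]
          rw [ih i (j - 1) (s0 + gold[j.toNat]'hjn) s1 false hm h0 (by omega)]
          simp
          try constructor
          all_goals ring
      · rw [if_neg hgt, if_neg hgt]
        have hm : (j + 1 - (i + 1)).toNat ≤ n := by omega
        cases t
        · simp only [Bool.false_eq_true, if_false]
          rw [ih (i + 1) j s0 (s1 + gold[i.toNat]'hi) true hm (by omega) hj]
          simp
          try constructor
          all_goals ring
        · simp only [if_true]
          rw [ih (i + 1) j (s0 + gold[i.toNat]'hi) s1 false hm (by omega) hj]
          simp
          try constructor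
          all_goals ring
    · have h0' : (j + 1 - i).toNat = 0 := by omega
      rw [h0', goldLoopB, if_neg hij]
      cases t <;> simp [pvF]

-- ===== VERDICT (by name: the statement is the Claim_ definition above) =====
theorem gold_distribution_spec : Claim_equal_gold_distribution := by
  intro gold _
  unfold Spec_gold_distribution gold_distribution gold_distribution_alt
  match gold with
  | [] => norm_num [goldLoopA, goldLoopB]
  | x :: xs =>
    have hB := loopB_eq (x :: xs) (x :: xs).length
        0 (xs.length : Int) 0 0 true (by push_cast [List.length_cons]; omega) (by omega)
        (by push_cast [List.length_cons]; omega)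
    have hfull : List.take (((xs.length : Int)) + 1 - (0 : Int)).toNat
        (List.drop ((0 : Int)).toNat (x :: xs)) = x :: xs := by
      have h1 : ((xs.length : Int) + 1 - (0 : Int)).toNat = xs.length + 1 := by omega
      rw [h1]
      simp

    rw [hfull] at hB
    simp only [if_true] at hB
    have hA := loopA_sum (x :: xs).length (x :: xs) [] [] true le_rfl
    simp only [if_true, List.sum_nil, zero_add] at hA
    have h1 : (goldLoopA (x :: xs).length (x :: xs) [] [] true).1.sum = (pvF (x :: xs)).1 :=
      congrArg Prod.fst hA
    have h2 : (goldLoopA (x :: xs).length (x :: xs) [] [] true).2.sum = (pvF (x :: xs)).2 :=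
      congrArg Prod.snd hA
    have hj : ((x :: xs).length : Int) - 1 = (xs.length : Int) := by
      push_cast [List.length_cons]; omega
    simp only [hj]
    rw [hB]
    simp only [List.cons.injEq, zero_add, and_true]
    exact ⟨h1, h2⟩
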